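-- pv_equiv track=rewrite | github.com/Tmas-mnslla-pnzzo/2D_FEM_PY | fem_funciones.py | encontrar_maximos_y_minimos
-- ===== SOURCE A (Python) =====
-- def encontrar_maximos_y_minimos(Tb_ext, Tb_int):
--     Tb_ext = [x[0] if type(x)==list else x for x in Tb_ext]
--     Tb_int = [x[0] if type(x)==list else x for x in Tb_int]
--     Tb_ext = [0 if x is None else x for x in Tb_ext]
--     Tb_int = [0 if x is None else x for x in Tb_int]
--     if not Tb_ext:
--         Tb_ext = [0]
--     if not Tb_int:
--         Tb_int = [0]
--     combinada = Tb_ext + Tb_int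
--     maximo = max(combinada)
--     minimo = max(0, min(combinada))
--     return maximo, minimo
-- ===== SOURCE B (Python) =====
-- def encontrar_maximos_y_minimos(Tb_ext, Tb_int):
--     # Sort-based re-implementation: normalize into one list, sort it once,
--     # and read the extremes off the sorted list's endpoints.
--     valores = []
--     for x in (Tb_ext or [0]):
--         if type(x) == list:
--             x = x[0]
--         valores.append(0 if x is None else x)
--     for x in (Tb_int or [0]):
--         if type(x) == list:
--             x = x[0]
--         valores.append(0 if x is None else x)
--     valores.sort()
--     return valores[-1], max(0, valores[0])
-- ===== Notes on version B (the rewrite author's own statement) =====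
-- stated objective: alternative
-- what changed: Replaces the four normalization list passes plus separate max() and min() scans with one normalization loop into a single list that is then sorted, the answers being read off the sorted list's endpoints (last element = max, first element, clamped to 0, = min).
import Mathlib
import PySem

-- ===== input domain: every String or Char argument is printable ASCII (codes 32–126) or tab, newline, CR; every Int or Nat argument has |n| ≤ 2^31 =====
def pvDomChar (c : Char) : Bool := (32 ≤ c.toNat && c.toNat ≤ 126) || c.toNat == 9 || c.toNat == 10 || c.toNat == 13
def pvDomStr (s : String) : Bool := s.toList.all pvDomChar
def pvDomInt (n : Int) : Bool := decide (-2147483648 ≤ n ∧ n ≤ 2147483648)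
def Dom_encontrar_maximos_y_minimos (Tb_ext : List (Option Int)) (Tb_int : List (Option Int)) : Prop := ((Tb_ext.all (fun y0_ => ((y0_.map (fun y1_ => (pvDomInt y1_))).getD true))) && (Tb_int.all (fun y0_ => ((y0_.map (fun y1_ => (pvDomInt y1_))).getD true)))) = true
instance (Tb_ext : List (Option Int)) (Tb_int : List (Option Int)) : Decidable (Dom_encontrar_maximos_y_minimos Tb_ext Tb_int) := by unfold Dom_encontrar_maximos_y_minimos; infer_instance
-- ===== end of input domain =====

-- B replaces A's staged normalization lists plus separate max()/min() scans by one
-- normalization loop into a single list that is sorted once, the answers being read off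
-- the sorted list's endpoints (objective: alternative).

-- ===== PORT A =====
-- Port of A. On List (Option Int), `x[0] if type(x)==list else x` is the identity
-- (elements are never Python lists on this domain); it is kept as an explicit map.
def encontrar_maximos_y_minimos (Tb_ext : List (Option Int)) (Tb_int : List (Option Int)) : Int × Int :=
  let e1 := Tb_ext.map (fun x => x)
  let i1 := Tb_int.map (fun x => x)
  let e2 := e1.map (fun x => match x with | none => (0 : Int) | some v => v)
  let i2 := i1.map (fun x => match x with | none => (0 : Int) | some v => v)
  let e3 := if e2 = [] then [(0 : Int)] else e2
  let i3 := if i2 = [] then [(0 : Int)] else i2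
  let combinada := e3 ++ i3
  let maximo := (PySem.List.max? combinada (fun y => y)).getD 0
  let minimo := max 0 ((PySem.List.min? combinada (fun y => y)).getD 0)
  (maximo, minimo)

-- ===== PORT B =====
-- Port of B: two appending loops build `valores`, then sort, then read the endpoints.
-- (`type(x)==list` is again the identity on this domain.)  `valores` is provably
-- nonempty (each `or [0]` list is), so the `.getD 0` after pyGet? is unreachable.
def pvAppendNorm (acc : List Int) (x : Option Int) : List Int :=
  acc ++ [match x with | none => (0 : Int) | some v => v]

def encontrar_maximos_y_minimos_alt (Tb_ext : List (Option Int)) (Tb_int : List (Option Int)) : Int × Int :=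
  let l1 := if Tb_ext = [] then [(some 0 : Option Int)] else Tb_ext
  let l2 := if Tb_int = [] then [(some 0 : Option Int)] else Tb_int
  let valores := l2.foldl pvAppendNorm (l1.foldl pvAppendNorm [])
  let s := PySem.List.sorted valores (fun y => y)
  ((PySem.List.pyGet? s (-1)).getD 0, max 0 ((PySem.List.pyGet? s 0).getD 0))

-- ===== PRECONDITION & SPEC =====
def Spec_encontrar_maximos_y_minimos (Tb_ext : List (Option Int)) (Tb_int : List (Option Int)) (out : Int × Int) : Prop := out = encontrar_maximos_y_minimos_alt Tb_ext Tb_int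
instance (Tb_ext : List (Option Int)) (Tb_int : List (Option Int)) (out : Int × Int) : Decidable (Spec_encontrar_maximos_y_minimos Tb_ext Tb_int out) := by unfold Spec_encontrar_maximos_y_minimos; infer_instance

-- ===== CLAIM (what is proved, stated in full; the proofs are below) =====
def Claim_equal_encontrar_maximos_y_minimos : Prop := ∀ (Tb_ext : List (Option Int)) (Tb_int : List (Option Int)), Dom_encontrar_maximos_y_minimos Tb_ext Tb_int → Spec_encontrar_maximos_y_minimos Tb_ext Tb_int (encontrar_maximos_y_minimos Tb_ext Tb_int)

-- ===== LEMMAS AND PROOFS =====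

-- normalization of one element
def pvNorm (x : Option Int) : Int := match x with | none => 0 | some v => v

-- per-list empty defaulting shared by both programs
def pvDef (l : List (Option Int)) : List (Option Int) := if l = [] then [some 0] else l

theorem pvDef_ne_nil (l : List (Option Int)) : pvDef l ≠ [] := by
  unfold pvDef; split <;> simp_all

theorem pvFold_eq_map (l : List (Option Int)) : ∀ acc,
    l.foldl pvAppendNorm acc = acc ++ l.map pvNorm := by
  induction l with
  | nil => intro acc; simp
  | cons x t ih =>
    intro acc
    simp only [List.foldl_cons, List.map_cons, ih, pvAppendNorm, pvNorm,
      List.append_assoc, List.singleton_append]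

theorem pv_portA (e i : List (Option Int)) :
    encontrar_maximos_y_minimos e i
      = ((PySem.List.max? ((pvDef e).map pvNorm ++ (pvDef i).map pvNorm) (fun y => y)).getD 0,
          max 0 ((PySem.List.min? ((pvDef e).map pvNorm ++ (pvDef i).map pvNorm) (fun y => y)).getD 0)) := by
  unfold encontrar_maximos_y_minimos pvDef
  have hn : (fun x : Option Int => match x with | none => (0 : Int) | some v => v) = pvNorm := rfl
  by_cases he : e = [] <;> by_cases hi : i = [] <;>
    simp [he, hi, hn, List.map_eq_nil_iff, pvNorm]

theorem pv_portB (e i : List (Option Int)) :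
    encontrar_maximos_y_minimos_alt e i
      = ((PySem.List.pyGet? (PySem.List.sorted ((pvDef e).map pvNorm ++ (pvDef i).map pvNorm) (fun y => y)) (-1)).getD 0,
          max 0 ((PySem.List.pyGet? (PySem.List.sorted ((pvDef e).map pvNorm ++ (pvDef i).map pvNorm) (fun y => y)) 0).getD 0)) := by
  unfold encontrar_maximos_y_minimos_alt pvDef
  simp only [pvFold_eq_map, List.nil_append]

-- endpoints of the sorted list are the extremes
theorem pv_main (v : List Int) (hv : v ≠ []) :
    ((PySem.List.pyGet? (PySem.List.sorted v (fun y => y)) (-1)).getD 0,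
      max 0 ((PySem.List.pyGet? (PySem.List.sorted v (fun y => y)) 0).getD 0))
    = ((PySem.List.max? v (fun y => y)).getD 0,
        max 0 ((PySem.List.min? v (fun y => y)).getD 0)) := by
  set s := PySem.List.sorted v (fun y => y) with hs
  have hperm : s.Perm v := PySem.List.sorted_perm ..
  have hsne : s ≠ [] := by
    intro h; apply hv
    have hl := hperm.length_eq
    rw [h] at hl
    simpa using List.length_eq_zero_iff.mp hl.symm
  obtain ⟨m, t, hcons⟩ := List.exists_cons_of_ne_nil hsne
  -- min side
  obtain ⟨mn, hmn⟩ : ∃ mn, PySem.List.min? v (fun y => y) = some mn := by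
    rcases h : PySem.List.min? v (fun y => y) with _ | mn
    · exact absurd ((PySem.List.min?_eq_none_iff ..).1 h) hv
    · exact ⟨mn, rfl⟩
  have hmn_mem : mn ∈ v := PySem.List.min?_mem hmn
  have hmn_min : ∀ y ∈ v, mn ≤ y := fun y hy => PySem.List.min?_isMin hmn y hy
  have hm_mem : m ∈ v := hperm.mem_iff.mp (by simp [hcons])
  have hm_le : ∀ y ∈ v, m ≤ y := by
    have := PySem.List.key_head_sorted_le (xs := v) (key := fun y => y) (m := m) (t := t)
      (by rw [← hs, hcons])
    exact this
  have hmin : m = mn := le_antisymm (hm_le mn hmn_mem) (hmn_min m hm_mem)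
  -- max side
  have hlen : 0 < s.length := by simp [hcons]
  have hlast : PySem.List.pyGet? s (-1) = some s[s.length - 1] := by
    rw [PySem.List.pyGet?_neg_one, List.getLast?_eq_getElem?]
    simp [List.getElem?_eq_getElem (by omega : s.length - 1 < s.length)]
  obtain ⟨mx, hmx⟩ : ∃ mx, PySem.List.max? v (fun y => y) = some mx := by
    rcases h : PySem.List.max? v (fun y => y) with _ | mx
    · exact absurd ((PySem.List.max?_eq_none_iff ..).1 h) hv
    · exact ⟨mx, rfl⟩
  have hmx_mem : mx ∈ v := PySem.List.max?_mem hmx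
  have hmx_max : ∀ y ∈ v, y ≤ mx := fun y hy => PySem.List.max?_isMax hmx y hy
  have hL_mem : s[s.length - 1] ∈ v := hperm.mem_iff.mp (List.getElem_mem _)
  have hL_ge : ∀ y ∈ v, y ≤ s[s.length - 1] := by
    intro y hy
    obtain ⟨j, hj, hje⟩ := List.getElem_of_mem (hperm.mem_iff.mpr hy)
    rw [← hje]
    exact PySem.List.sorted_id_getElem_mono (xs := v) (p := j) (q := s.length - 1)
      (by omega) (by rw [← hs]; omega)
  have hmax : s[s.length - 1] = mx :=
    le_antisymm (hmx_max _ hL_mem) (hL_ge mx hmx_mem)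
  have hhead : PySem.List.pyGet? s 0 = some m := by
    rw [hcons]; exact PySem.List.pyGet?_zero_cons ..
  rw [hlast, hhead, hmn, hmx, hmin, hmax]

-- ===== VERDICT (by name: the statement is the Claim_ definition above) =====
theorem encontrar_maximos_y_minimos_spec : Claim_equal_encontrar_maximos_y_minimos := by
  intro e i _
  show _ = _
  rw [pv_portA, pv_portB, pv_main]
  intro h
  rcases List.append_eq_nil_iff.mp h with ⟨h1, _⟩
  exact pvDef_ne_nil e (List.map_eq_nil_iff.mp h1)
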